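-- pv_equiv track=rewrite | github.com/amistein/aoc-2023 | solutions/day_05.py | get_maps
-- ===== SOURCE A (Python) =====
-- def get_maps(data):
--     to_ints = lambda x: [int(n) for n in x]
--     seed_soil = {}
--     soil_fertilizer = {}
--     fertilizer_water = {}
--     water_light = {}
--     light_temperature = {}
--     temperature_humidity = {}
--     humidity_location = {}
--
--     maps = [seed_soil, soil_fertilizer, fertilizer_water, water_light, light_temperature, temperature_humidity, humidity_location]
--
--     curr_map = -1
--     line = 1
--     while line < len(data):
--         if not data[line]:
--             curr_map += 1
--             line += 2
--
--         d, s, r = to_ints(data[line].split())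
--         maps[curr_map][s] = (r, d)
--         line += 1
--
--     return maps
-- ===== SOURCE B (Python) =====
-- def get_maps(data):
--     # Parse the almanac in two phases: locate the first section separator, split
--     # the rest into blank-line-delimited sections, then fill each section's
--     # dictionary from its rows (first line of a section is its header).
--     maps = [{} for _ in range(7)]
--     if len(data) < 2:
--         return maps
--     tail = data[1:]
--     first = tail.index("")          # ValueError when the almanac has no separator
--     sections = []
--     current = []
--     for line in tail[first + 1:]:
--         if line:
--             current.append(line)
--         else:
--             sections.append(current)
--             current = []
--     sections.append(current)
--     for i, section in enumerate(sections):
--         for row in section[1:]: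
--             d, s, r = [int(n) for n in row.split()]
--             maps[i][s] = (r, d)
--     return maps
-- ===== Notes on version B (the rewrite author's own statement) =====
-- stated objective: alternative
-- what changed: B parses in two phases - find the first separator, split the remainder into blank-line-delimited sections, then fill each section's dictionary from its rows (header discarded) - replacing A's single index-arithmetic walk with a curr_map counter and unconditional line+=2 skips.
-- intended difference: On almanacs that carry rows before the first separator blank line, A files those rows into the LAST dictionary (humidity_location) via the curr_map=-1 negative-index wraparound, while B treats everything before the first separator as preamble and fills only the actual sections' dictionaries, which is the intended sectioning. — e.g. on get_maps(["seeds: 79", "1 2 3", "", "a map:", "4 5 6"]): A returns [[(5, 6, 4)], [], [], [], [], [], [(2, 3, 1)]], B returns [[(5, 6, 4)], [], [], [], [], [], []]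
-- outside the precondition, e.g. on get_maps(['h', '1 2 3']): A returns [{}, {}, {}, {}, {}, {}, {2: (3, 1)}], B raises ValueError
import Mathlib
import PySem

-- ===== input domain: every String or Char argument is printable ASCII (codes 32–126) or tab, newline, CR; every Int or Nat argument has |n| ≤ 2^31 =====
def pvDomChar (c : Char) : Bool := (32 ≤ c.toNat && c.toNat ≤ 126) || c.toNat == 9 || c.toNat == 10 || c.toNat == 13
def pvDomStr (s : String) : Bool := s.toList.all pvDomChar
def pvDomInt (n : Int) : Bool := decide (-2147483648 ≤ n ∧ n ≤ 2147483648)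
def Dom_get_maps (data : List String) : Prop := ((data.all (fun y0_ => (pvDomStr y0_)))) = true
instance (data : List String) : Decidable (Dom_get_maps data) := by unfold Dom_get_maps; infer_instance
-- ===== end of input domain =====

-- B replaces A's index-arithmetic walk (curr_map counter, unconditional line += 2 skips)
-- by a two-phase parser: split into blank-line-delimited sections, then fill each
-- section's dictionary from its rows; same cost, different decomposition ("alternative").


-- ===== PORT A =====
-- to_ints = lambda x: [int(n) for n in x]   (none = ValueError)
def pvToInts (xs : List String) : Option (List Int) := xs.mapM PySem.Int.ofStr?

-- "d, s, r = to_ints(line.split())" — none where Python raises (ValueError / unpack error)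
def pvParseRow (s : String) : Option (Int × Int × Int) :=
  match pvToInts (PySem.Str.split₀ s) with
  | some [d, sk, r] => some (d, sk, r)
  | _ => none

-- "maps[i][s] = v": Python list indexing (negative from the end); out of range = IndexError,
-- reached only outside Pre_, where we leave maps unchanged.
def pvSetMap (maps : List (PySem.Dict Int (Int × Int))) (i : Int) (k : Int) (v : Int × Int) :
    List (PySem.Dict Int (Int × Int)) :=
  match PySem.List.pyGet? maps i with
  | some d => (PySem.List.pySet? maps i (d.insert k v)).getD maps
  | none => maps

-- the while loop of A; `line` only ever grows from 1, so it is kept as a Nat index,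
-- and the loop is transcribed with the standard fuel bound (len(data) suffices: line
-- strictly increases each iteration), which only makes the same computation total.
-- On the inputs excluded by Pre_ Python raises (IndexError / ValueError); there the
-- out-of-range read is a default "" and a failed parse just returns maps.
def pvLoopA (data : List String) (fuel : Nat) (maps : List (PySem.Dict Int (Int × Int))) (cm : Int) (line : Nat) :
    List (PySem.Dict Int (Int × Int)) :=
  match fuel with
  | 0 => maps
  | fuel + 1 =>
    if h : line < data.length then
      let cm' : Int := if data[line] = "" then cm + 1 else cm
      let line' : Nat := if data[line] = "" then line + 2 else line
      match pvParseRow (data.getD line' "") with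
      | some (d, s, r) => pvLoopA data fuel (pvSetMap maps cm' s (r, d)) cm' (line' + 1)
      | none => maps
    else maps

def get_maps (data : List String) : List (List (Int × Int × Int)) :=
  let maps : List (PySem.Dict Int (Int × Int)) :=
    [PySem.Dict.empty, PySem.Dict.empty, PySem.Dict.empty, PySem.Dict.empty,
     PySem.Dict.empty, PySem.Dict.empty, PySem.Dict.empty]
  (pvLoopA data data.length maps (-1) 1).map PySem.Dict.items

-- ===== PORT B =====
-- "d, s, r = [int(n) for n in row.split()]; maps[i][s] = (r, d)"  (a failed parse is a
-- ValueError in Python, reached only outside Pre_; here it leaves maps unchanged)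
def pvUpd (i : Int) (m : List (PySem.Dict Int (Int × Int))) (row : String) :
    List (PySem.Dict Int (Int × Int)) :=
  match pvParseRow row with
  | some (d, s, r) => pvSetMap m i s (r, d)
  | none => m

def get_maps_alt (data : List String) : List (List (Int × Int × Int)) :=
  let maps0 : List (PySem.Dict Int (Int × Int)) := List.replicate 7 PySem.Dict.empty
  if data.length < 2 then maps0.map PySem.Dict.items
  else
    let tail := data.drop 1
    -- "first = tail.index(\"\")": ValueError (none) when no separator exists; Pre_ excludes that
    match PySem.List.index? tail "" with
    | none => maps0.map PySem.Dict.items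
    | some first =>
      -- tail[first + 1:] with 0 ≤ first + 1 ≤ len(tail): the slice is List.drop
      let st := (tail.drop (first + 1)).foldl
          (fun (st : List (List String) × List String) line =>
            if line ≠ "" then (st.1, st.2 ++ [line]) else (st.1 ++ [st.2], []))
          ([], [])
      let sections := st.1 ++ [st.2]
      let maps := (PySem.List.enumerate sections 0).foldl
          (fun m (p : Int × List String) => (p.2.drop 1).foldl (pvUpd p.1) m)
          maps0
      maps.map PySem.Dict.items

-- ===== PRECONDITION & SPEC =====
-- the almanac line grammar A's walk accepts: a blank line must be followed by a (skipped)
-- header line and a row of exactly three ints, and every other line is such a row.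
def pvWf : List String → Bool
  | [] => true
  | r :: rest =>
    if r = "" then
      match rest with
      | _ :: row :: rest' => (pvParseRow row).isSome && pvWf rest'
      | _ => false
    else (pvParseRow r).isSome && pvWf rest

def pvHasConsecBlank : List String → Bool
  | [] => false
  | [_] => false
  | a :: b :: rest => (a == "" && b == "") || pvHasConsecBlank (b :: rest)

-- Pre_ = the inputs on which A returns normally (otherwise: IndexError past the end,
-- ValueError on a bad row, IndexError on an 8th section), narrowed in three stated ways
-- (see the cited examples): (1) the TOTAL number of blank lines is bounded by 7, and by 6
-- when rows precede the first blank line (A can return beyond those bounds only in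
-- degenerate layouts whose placements its skip arithmetic scrambles); (2) a multi-line
-- almanac must contain a separator blank line (without one A can still return, filing
-- every row into the last map via curr_map = -1, while B's tail.index("") raises
-- ValueError); (3) no two adjacent blank lines (A can return after skipping a blank line
-- as if it were a header — a degenerate layout no one would specify).
def Pre_get_maps (data : List String) : Prop :=
  (data.drop 1).count "" ≤ 7 ∧ pvWf (data.drop 1) = true ∧
  (data.length ≤ 1 ∨ "" ∈ data.drop 1) ∧
  pvHasConsecBlank (data.drop 1) = false ∧
  ((data.drop 1).headD "" ≠ "" → (data.drop 1).count "" ≤ 6)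
instance (data : List String) : Decidable (Pre_get_maps data) := by
  unfold Pre_get_maps; infer_instance

def pvWitness_get_maps : List String :=
  ["seeds: 79", "", "seed-to-soil map:", "50 98 2", "1 2 3", "", "soil map:", "52 50 48"]

-- On almanacs that carry rows before the first separator blank line, A files those rows
-- into the LAST map (humidity_location) through the curr_map = -1 negative-index
-- wraparound, while B treats everything before the first separator as preamble and fills
-- only the dictionaries of the actual sections — the intended sectioning.
def D_get_maps (data : List String) : Prop :=
  (data.drop 1).headD "" ≠ ""
instance (data : List String) : Decidable (D_get_maps data) := by
  unfold D_get_maps; infer_instance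

def Spec_get_maps (data : List String) (out : List (List (Int × Int × Int))) : Prop :=
  ¬ D_get_maps data → out = get_maps_alt data
instance (data : List String) (out : List (List (Int × Int × Int))) :
    Decidable (Spec_get_maps data out) := by unfold Spec_get_maps; infer_instance

def pvDiffWitness_get_maps : List String := ["seeds: 79", "1 2 3", "", "a map:", "4 5 6"]

def pvDiffWitnessOut_get_maps :
    (List (List (Int × Int × Int))) × (List (List (Int × Int × Int))) :=
  ([[(5, 6, 4)], [], [], [], [], [], [(2, 3, 1)]], [[(5, 6, 4)], [], [], [], [], [], []])

-- ===== CLAIM (what is proved, stated in full; the proofs are below) =====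
def Claim_unchanged_get_maps : Prop :=
  ∀ (data : List String), Dom_get_maps data → Pre_get_maps data →
    Spec_get_maps data (get_maps data)
def Claim_changed_get_maps : Prop :=
  Dom_get_maps (pvDiffWitness_get_maps) ∧ Pre_get_maps (pvDiffWitness_get_maps) ∧
  D_get_maps (pvDiffWitness_get_maps) ∧
  get_maps (pvDiffWitness_get_maps) = pvDiffWitnessOut_get_maps.1 ∧
  get_maps_alt (pvDiffWitness_get_maps) = pvDiffWitnessOut_get_maps.2 ∧
  pvDiffWitnessOut_get_maps.1 ≠ pvDiffWitnessOut_get_maps.2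
def Claim_exact_get_maps : Prop :=
  ∀ (data : List String), Dom_get_maps data → Pre_get_maps data → D_get_maps data →
    get_maps data ≠ get_maps_alt data

-- ===== LEMMAS AND PROOFS =====

-- A's walk, re-read on the suffix data.drop line (proof-only reformulation)
def pvLoopL (t : List String) (m : List (PySem.Dict Int (Int × Int))) (cm : Int) :
    List (PySem.Dict Int (Int × Int)) :=
  match t with
  | [] => m
  | x :: rest =>
    if x = "" then
      match pvParseRow (rest.getD 1 "") with
      | some (d, s, r) => pvLoopL (rest.drop 2) (pvSetMap m (cm + 1) s (r, d)) (cm + 1)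
      | none => m
    else
      match pvParseRow x with
      | some (d, s, r) => pvLoopL rest (pvSetMap m cm s (r, d)) cm
      | none => m
termination_by t.length
decreasing_by all_goals simp

lemma pvLoopL_nil (m : List (PySem.Dict Int (Int × Int))) (cm : Int) :
    pvLoopL [] m cm = m := by
  rw [pvLoopL]

lemma pvLoopL_blank (rest : List String) (m : List (PySem.Dict Int (Int × Int))) (cm : Int) :
    pvLoopL ("" :: rest) m cm =
      match pvParseRow (rest.getD 1 "") with
      | some (d, s, r) => pvLoopL (rest.drop 2) (pvSetMap m (cm + 1) s (r, d)) (cm + 1)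
      | none => m := by
  rw [pvLoopL, if_pos rfl]

lemma pvLoopL_row (x : String) (hx : x ≠ "") (rest : List String)
    (m : List (PySem.Dict Int (Int × Int))) (cm : Int) :
    pvLoopL (x :: rest) m cm =
      match pvParseRow x with
      | some (d, s, r) => pvLoopL rest (pvSetMap m cm s (r, d)) cm
      | none => m := by
  rw [pvLoopL, if_neg hx]

lemma pvLoopA_eq_loopL (data : List String) :
    ∀ (fuel line : Nat) (m : List (PySem.Dict Int (Int × Int))) (cm : Int),
      data.length ≤ line + fuel →
      pvLoopA data fuel m cm line = pvLoopL (data.drop line) m cm := by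
  intro fuel
  induction fuel with
  | zero =>
    intro line m cm h
    rw [pvLoopA, List.drop_eq_nil_of_le (by omega), pvLoopL]
  | succ fuel ih =>
    intro line m cm h
    by_cases hl : line < data.length
    · rw [pvLoopA, dif_pos hl, List.drop_eq_getElem_cons hl, pvLoopL]
      by_cases hb : data[line] = ""
      · simp only [hb, if_pos rfl, if_true]
        have hget : (data.drop (line + 1)).getD 1 "" = data.getD (line + 2) "" := by
          simp [List.getD, List.getElem?_drop]
        rw [hget]
        cases hp : pvParseRow (data.getD (line + 2) "") with
        | some v =>
          obtain ⟨d, s, r⟩ := v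
          dsimp only
          have hdd : (data.drop (line + 1)).drop 2 = data.drop (line + 3) := by
            rw [List.drop_drop]
          rw [hdd]
          exact ih _ _ _ (by omega)
        | none => rfl
      · simp only [if_neg hb]
        have hget : data.getD line "" = data[line] := by
          simp [List.getD, List.getElem?_eq_getElem hl]
        rw [hget]
        cases hp : pvParseRow data[line] with
        | some v =>
          obtain ⟨d, s, r⟩ := v
          dsimp only
          exact ih _ _ _ (by omega)
        | none => rfl
    · rw [pvLoopA, dif_neg hl, List.drop_eq_nil_of_le (by omega), pvLoopL]

-- the longest nonblank prefix (the rows of the current section) and the remainder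
def pvRowsRest (t : List String) : List String × List String :=
  match t with
  | [] => ([], [])
  | x :: rest =>
    if x = "" then ([], x :: rest)
    else (x :: (pvRowsRest rest).1, (pvRowsRest rest).2)

lemma pvRowsRest_append : ∀ t : List String, (pvRowsRest t).1 ++ (pvRowsRest t).2 = t := by
  intro t
  induction t with
  | nil => rfl
  | cons x rest ih =>
    by_cases hx : x = "" <;> simp [pvRowsRest, hx, ih]

lemma pvRowsRest_len : ∀ t : List String, (pvRowsRest t).2.length ≤ t.length := by
  intro t
  induction t with
  | nil => simp [pvRowsRest]
  | cons x rest ih =>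
    by_cases hx : x = "" <;> simp [pvRowsRest, hx] <;> omega

lemma pvParseRow_empty : pvParseRow "" = none := by decide

lemma pvWf_rows : ∀ t : List String, pvWf t = true →
    (∀ r ∈ (pvRowsRest t).1, (pvParseRow r).isSome = true) ∧
    pvWf (pvRowsRest t).2 = true ∧ (pvRowsRest t).2.headD "" = "" := by
  intro t
  induction t with
  | nil => intro _; simp [pvRowsRest, pvWf]
  | cons x rest ih =>
    intro hwf
    by_cases hx : x = ""
    · subst hx
      have hrr : pvRowsRest ("" :: rest) = ([], "" :: rest) := rfl
      rw [hrr]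
      exact ⟨by simp, hwf, rfl⟩
    · rw [pvWf.eq_def] at hwf
      simp only [hx, if_false, Bool.and_eq_true] at hwf
      obtain ⟨hpx, hrest⟩ := hwf
      obtain ⟨h1, h2, h3⟩ := ih hrest
      have hrr : pvRowsRest (x :: rest) = (x :: (pvRowsRest rest).1, (pvRowsRest rest).2) := by
        rw [pvRowsRest, if_neg hx]
      rw [hrr]
      refine ⟨?_, h2, h3⟩
      intro r hr
      rcases List.mem_cons.mp hr with h | h
      · subst h; exact hpx
      · exact h1 r h

lemma pvConsec_tail : ∀ (x : String) (rest : List String),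
    pvHasConsecBlank (x :: rest) = false → pvHasConsecBlank rest = false := by
  intro x rest h
  cases rest with
  | nil => rfl
  | cons b r =>
    rw [pvHasConsecBlank] at h
    exact (Bool.or_eq_false_iff.mp h).2

lemma pvConsec_rowsRest : ∀ t : List String,
    pvHasConsecBlank t = false → pvHasConsecBlank (pvRowsRest t).2 = false := by
  intro t
  induction t with
  | nil => intro _; rfl
  | cons x rest ih =>
    intro h
    by_cases hx : x = ""
    · subst hx; simpa [pvRowsRest] using h
    · simp only [pvRowsRest, if_neg hx]
      exact ih (pvConsec_tail x rest h)

lemma pvLoopL_rows : ∀ (rows rest : List String) (m : List (PySem.Dict Int (Int × Int))) (cm : Int),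
    (∀ r ∈ rows, (pvParseRow r).isSome = true) →
    pvLoopL (rows ++ rest) m cm = pvLoopL rest (rows.foldl (pvUpd cm) m) cm := by
  intro rows
  induction rows with
  | nil => intro rest m cm _; rfl
  | cons r rows' ih =>
    intro rest m cm hall
    have hp : (pvParseRow r).isSome = true := hall r (by simp)
    have hne : r ≠ "" := by
      intro h; subst h; rw [pvParseRow_empty] at hp; simp at hp
    obtain ⟨⟨d, s, rr⟩, hv⟩ := Option.isSome_iff_exists.mp hp
    rw [List.cons_append, pvLoopL_row r hne, hv]
    dsimp only
    rw [ih rest _ cm (fun r hr => hall r (by simp [hr]))]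
    simp [List.foldl_cons, pvUpd, hv]

-- the section-splitting foldl of B, as a recursion
def pvSplit (t : List String) (cur : List String) : List (List String) × List String :=
  match t with
  | [] => ([], cur)
  | x :: rest =>
    if x = "" then ((cur :: (pvSplit rest []).1), (pvSplit rest []).2)
    else pvSplit rest (cur ++ [x])

lemma pvFoldl_split : ∀ (t : List String) (secs : List (List String)) (cur : List String),
    t.foldl (fun (st : List (List String) × List String) line =>
        if line ≠ "" then (st.1, st.2 ++ [line]) else (st.1 ++ [st.2], []))
      (secs, cur)
    = (secs ++ (pvSplit t cur).1, (pvSplit t cur).2) := by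
  intro t
  induction t with
  | nil => intro secs cur; simp [pvSplit]
  | cons x rest ih =>
    intro secs cur
    by_cases hx : x = ""
    · simp only [List.foldl_cons, hx, ne_eq, not_true_eq_false, if_false, ite_false, pvSplit,
        if_pos rfl]
      rw [ih]
      simp
    · simp only [List.foldl_cons, hx, ne_eq, not_false_eq_true, if_true, ite_true, pvSplit,
        if_neg hx]
      exact ih secs (cur ++ [x])

lemma pvSplit_eq : ∀ (t cur : List String),
    pvSplit t cur =
      match (pvRowsRest t).2 with
      | [] => ([], cur ++ (pvRowsRest t).1)
      | _ :: v => ((cur ++ (pvRowsRest t).1) :: (pvSplit v []).1, (pvSplit v []).2) := by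
  intro t
  induction t with
  | nil => intro cur; simp [pvSplit, pvRowsRest]
  | cons x rest ih =>
    intro cur
    by_cases hx : x = ""
    · simp [pvSplit, pvRowsRest, hx]
    · simp only [pvSplit, if_neg hx, pvRowsRest]
      rw [ih (cur ++ [x])]
      cases (pvRowsRest rest).2 with
      | nil => simp [if_neg hx]
      | cons y v => simp [if_neg hx]

-- the body of B's outer fold
def pvF (m : List (PySem.Dict Int (Int × Int))) (p : Int × List String) :
    List (PySem.Dict Int (Int × Int)) :=
  (p.2.drop 1).foldl (pvUpd p.1) m

lemma pvMain : ∀ (N : Nat) (t : List String), t.length ≤ N →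
    ∀ (m : List (PySem.Dict Int (Int × Int))) (n : Nat),
    pvWf t = true → pvHasConsecBlank t = false → t.headD "" = "" →
    pvLoopL t m ((n : Int) - 1)
      = (PySem.List.enumerate (((pvSplit t []).1 ++ [(pvSplit t []).2]).drop 1) n).foldl pvF m := by
  intro N
  induction N with
  | zero =>
    intro t ht m n _ _ _
    have : t = [] := List.eq_nil_of_length_eq_zero (by omega)
    subst this
    simp [pvLoopL, pvSplit, PySem.List.enumerate]
  | succ N ih =>
    intro t ht m n hwf hcons hhead
    cases t with
    | nil => simp [pvLoopL, pvSplit, PySem.List.enumerate]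
    | cons x rest =>
      have hx : x = "" := by simpa using hhead
      subst hx
      cases rest with
      | nil => exact absurd hwf (by decide)
      | cons hdr rest1 =>
        cases rest1 with
        | nil => exact absurd hwf (by rw [show pvWf ["", hdr] = false from rfl]; simp)
        | cons row rest2 =>
          have hwfx : ((pvParseRow row).isSome && pvWf rest2) = true := hwf
          obtain ⟨hprow, hwf2⟩ := Bool.and_eq_true_iff.mp hwfx
          have hhdr : hdr ≠ "" := by
            intro h; subst h
            rw [pvHasConsecBlank] at hcons
            simp at hcons
          have hrowne : row ≠ "" := by
            intro h; subst h; rw [pvParseRow_empty] at hprow; simp at hprow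
          obtain ⟨h1, h2, h3⟩ := pvWf_rows rest2 hwf2
          have hcons2 : pvHasConsecBlank (pvRowsRest rest2).2 = false :=
            pvConsec_rowsRest rest2
              (pvConsec_tail row rest2 (pvConsec_tail hdr _ (pvConsec_tail "" _ hcons)))
          obtain ⟨⟨d, s, rr⟩, hv⟩ := Option.isSome_iff_exists.mp hprow
          -- A side: consume the blank, the skipped header and the section's rows
          have hAL :
              pvLoopL ("" :: hdr :: row :: rest2) m ((n : Int) - 1)
                = pvLoopL (pvRowsRest rest2).2
                    ((row :: (pvRowsRest rest2).1).foldl (pvUpd (n : Int)) m) (n : Int) := by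
            rw [pvLoopL_blank]
            rw [show (hdr :: row :: rest2).getD 1 "" = row from rfl, hv]
            dsimp only
            rw [show (hdr :: row :: rest2).drop 2 = rest2 from rfl]
            rw [show ((n : Int) - 1 + 1) = (n : Int) by ring]
            conv_lhs => rw [← pvRowsRest_append rest2]
            rw [pvLoopL_rows _ _ _ _ h1]
            simp [List.foldl_cons, pvUpd, hv]
          rw [hAL]
          -- B side: the section splitter produces [] :: (hdr :: rows) :: …
          have hu2 : pvRowsRest (row :: rest2) = (row :: (pvRowsRest rest2).1, (pvRowsRest rest2).2) := by
            rw [pvRowsRest, if_neg hrowne]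
          have hu : pvRowsRest (hdr :: row :: rest2)
              = (hdr :: row :: (pvRowsRest rest2).1, (pvRowsRest rest2).2) := by
            rw [pvRowsRest, if_neg hhdr, hu2]
          have hsp0 : pvSplit ("" :: hdr :: row :: rest2) []
              = (([] : List String) :: (pvSplit (hdr :: row :: rest2) []).1,
                 (pvSplit (hdr :: row :: rest2) []).2) := by
            rw [pvSplit, if_pos rfl]
          have hspu := pvSplit_eq (hdr :: row :: rest2) []
          rw [hu] at hspu
          cases hr2 : (pvRowsRest rest2).2 with
          | nil =>
            rw [hr2] at hspu h2 h3
            dsimp only at hspu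
            rw [hsp0, hspu]
            simp [pvLoopL, PySem.List.enumerate_cons, PySem.List.enumerate_nil, pvF]
          | cons y v =>
            rw [hr2] at hspu h2 h3 hcons2
            have hy : y = "" := by simpa using h3
            subst hy
            dsimp only at hspu
            have hlen : ("" :: v).length ≤ N := by
              have h4 := pvRowsRest_len rest2
              rw [hr2] at h4
              simp at ht h4 ⊢
              omega
            have hIH := ih ("" :: v) hlen
              ((row :: (pvRowsRest rest2).1).foldl (pvUpd (n : Int)) m) (n + 1) h2 hcons2 rfl
            rw [show ((n + 1 : Nat) : Int) - 1 = (n : Int) by push_cast; ring] at hIH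
            rw [hIH]
            have hsp : pvSplit ("" :: v) []
                = (([] : List String) :: (pvSplit v []).1, (pvSplit v []).2) := by
              rw [pvSplit, if_pos rfl]
            rw [hsp, hsp0, hspu]
            simp only [List.nil_append, List.cons_append, List.drop_one, List.tail_cons,
              PySem.List.enumerate_cons, List.foldl_cons]
            rw [show ((n : Int) + 1) = ((n + 1 : Nat) : Int) by push_cast; ring]
            rfl

-- == tightness: on every admitted almanac with rows before the first separator, A and B differ ==

lemma pvItems_insert_ne_nil (d : PySem.Dict Int (Int × Int)) (k : Int) (v : Int × Int) :
    (d.insert k v).items ≠ [] := by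
  rw [PySem.Dict.items_insert]
  by_cases h : d.contains k
  · simp only [h, if_true]
    intro hnil
    rw [List.map_eq_nil_iff] at hnil
    have hk := (PySem.Dict.contains_iff_mem_keys d k).mp h
    simp only [PySem.Dict.keys, hnil] at hk
    simp at hk
  · simp [h]

lemma pvLen_pvSetMap (m : List (PySem.Dict Int (Int × Int))) (i : Int) (k : Int) (v : Int × Int) :
    (pvSetMap m i k v).length = m.length := by
  unfold pvSetMap
  cases hg : PySem.List.pyGet? m i with
  | none => rfl
  | some d =>
    dsimp only
    unfold PySem.List.pySet?
    cases hi : PySem.List.pyIdx? m.length i with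
    | none => rfl
    | some j => simp

lemma pvGet6_pvSetMap_le5 (m : List (PySem.Dict Int (Int × Int))) (i : Int) (k : Int)
    (v : Int × Int) (h0 : 0 ≤ i) (h5 : i ≤ 5) : (pvSetMap m i k v)[6]? = m[6]? := by
  unfold pvSetMap
  cases hg : PySem.List.pyGet? m i with
  | none => rfl
  | some d =>
    dsimp only
    unfold PySem.List.pySet? PySem.List.pyIdx?
    rw [if_pos h0]
    by_cases hlt : i < (m.length : Int)
    · rw [if_pos hlt]
      dsimp only [Option.map, Option.getD]
      rw [List.getElem?_set_ne (by omega)]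
    · rw [if_neg hlt]
      rfl

lemma pvGet6_pvSetMap_neg_one (m : List (PySem.Dict Int (Int × Int))) (h7 : m.length = 7)
    (k : Int) (v : Int × Int) (d : PySem.Dict Int (Int × Int)) (h6 : m[6]? = some d) :
    (pvSetMap m (-1) k v)[6]? = some (d.insert k v) := by
  have hg : PySem.List.pyGet? m (-1) = some d := by
    rw [PySem.List.pyGet?_neg_one, List.getLast?_eq_getElem?, h7]
    exact h6
  unfold pvSetMap
  rw [hg]
  dsimp only
  unfold PySem.List.pySet?
  rw [h7, show PySem.List.pyIdx? 7 (-1) = some 6 from by decide]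
  dsimp only [Option.map, Option.getD]
  rw [List.getElem?_set_self (by omega)]

lemma pvKeep6 : ∀ (N : Nat) (t : List String), t.length ≤ N →
    ∀ (m : List (PySem.Dict Int (Int × Int))) (cm : Int), 0 ≤ cm →
    cm + (t.count "" : Int) ≤ 5 → (pvLoopL t m cm)[6]? = m[6]? := by
  intro N
  induction N with
  | zero =>
    intro t ht m cm _ _
    have : t = [] := List.eq_nil_of_length_eq_zero (by omega)
    subst this
    rw [pvLoopL_nil]
  | succ N ih =>
    intro t ht m cm h0 h5
    cases t with
    | nil => rw [pvLoopL_nil]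
    | cons x rest =>
      by_cases hx : x = ""
      · subst hx
        have hcnt : ("" :: rest).count "" = rest.count "" + 1 := by
          simp [List.count_cons]
        rw [hcnt] at h5
        have hdropcnt : (rest.drop 2).count "" ≤ rest.count "" :=
          (List.drop_sublist 2 rest).count_le ""
        rw [pvLoopL_blank]
        cases hp : pvParseRow (rest.getD 1 "") with
        | some v =>
          obtain ⟨d, s, r⟩ := v
          dsimp only
          rw [ih (rest.drop 2) (by simp at ht ⊢; omega) _ (cm + 1) (by omega)
              (by push_cast at h5 ⊢; omega)]
          rw [pvGet6_pvSetMap_le5 _ _ _ _ (by omega) (by push_cast at h5; omega)]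
        | none => rfl
      · have hcnt : (x :: rest).count "" = rest.count "" := by
          simp [hx]
        rw [hcnt] at h5
        rw [pvLoopL_row x hx]
        cases hp : pvParseRow x with
        | some v =>
          obtain ⟨d, s, r⟩ := v
          dsimp only
          rw [ih rest (by simp at ht; omega) _ cm h0 (by push_cast at h5 ⊢; omega)]
          rw [pvGet6_pvSetMap_le5 _ _ _ _ h0 (by push_cast at h5; omega)]
        | none => rfl

lemma pvPreA : ∀ (N : Nat) (t : List String), t.length ≤ N →
    ∀ (m : List (PySem.Dict Int (Int × Int))), pvWf t = true → t.count "" ≤ 6 →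
    m.length = 7 → (∃ d, m[6]? = some d ∧ d.items ≠ []) →
    ∃ d, (pvLoopL t m (-1))[6]? = some d ∧ d.items ≠ [] := by
  intro N
  induction N with
  | zero =>
    intro t ht m _ _ _ hm
    have : t = [] := List.eq_nil_of_length_eq_zero (by omega)
    subst this
    rw [pvLoopL_nil]
    exact hm
  | succ N ih =>
    intro t ht m hwf hcnt h7 hm
    cases t with
    | nil => rw [pvLoopL_nil]; exact hm
    | cons x rest =>
      by_cases hx : x = ""
      · subst hx
        cases rest with
        | nil => exact absurd hwf (by decide)
        | cons hdr rest1 =>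
          cases rest1 with
          | nil => exact absurd hwf (by rw [show pvWf ["", hdr] = false from rfl]; simp)
          | cons row rest2 =>
            have hwfx : ((pvParseRow row).isSome && pvWf rest2) = true := hwf
            obtain ⟨hprow, _⟩ := Bool.and_eq_true_iff.mp hwfx
            obtain ⟨⟨d, s, rr⟩, hv⟩ := Option.isSome_iff_exists.mp hprow
            rw [pvLoopL_blank]
            rw [show (hdr :: row :: rest2).getD 1 "" = row from rfl, hv]
            dsimp only
            rw [show (hdr :: row :: rest2).drop 2 = rest2 from rfl]
            have hc : ("" :: hdr :: row :: rest2).count "" = (hdr :: row :: rest2).count "" + 1 := by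
              simp [List.count_cons]
            have hc2 : rest2.count "" ≤ (hdr :: row :: rest2).count "" :=
              (List.sublist_cons_self row rest2).count_le "" |>.trans
                ((List.sublist_cons_self hdr (row :: rest2)).count_le "")
            rw [show ((-1 : Int) + 1) = 0 from by ring]
            rw [pvKeep6 rest2.length rest2 le_rfl _ 0 le_rfl (by push_cast; omega)]
            rw [pvGet6_pvSetMap_le5 _ _ _ _ le_rfl (by omega)]
            exact hm
      · rw [pvLoopL_row x hx]
        have hwfx : ((pvParseRow x).isSome && pvWf rest) = true := by
          rw [pvWf.eq_def] at hwf
          simpa [hx] using hwf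
        obtain ⟨hpx, hwfrest⟩ := Bool.and_eq_true_iff.mp hwfx
        obtain ⟨⟨d, s, rr⟩, hv⟩ := Option.isSome_iff_exists.mp hpx
        rw [hv]
        dsimp only
        obtain ⟨d0, hd0, _⟩ := hm
        have hcnt' : rest.count "" ≤ 6 := by
          have : (x :: rest).count "" = rest.count "" := by
            simp [hx]
          omega
        exact ih rest (by simp at ht; omega) _ hwfrest hcnt'
          (by rw [pvLen_pvSetMap]; exact h7)
          ⟨d0.insert s (rr, d), pvGet6_pvSetMap_neg_one m h7 s (rr, d) d0 hd0,
           pvItems_insert_ne_nil d0 s (rr, d)⟩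

lemma pvGet6_pvUpd (m : List (PySem.Dict Int (Int × Int))) (i : Int) (row : String)
    (h0 : 0 ≤ i) (h5 : i ≤ 5) : (pvUpd i m row)[6]? = m[6]? := by
  unfold pvUpd
  cases hp : pvParseRow row with
  | some v => obtain ⟨d, s, r⟩ := v; exact pvGet6_pvSetMap_le5 _ _ _ _ h0 h5
  | none => rfl

lemma pvGet6_foldRows (rows : List String) : ∀ (i : Int), 0 ≤ i → i ≤ 5 →
    ∀ (m : List (PySem.Dict Int (Int × Int))), (rows.foldl (pvUpd i) m)[6]? = m[6]? := by
  induction rows with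
  | nil => intro i _ _ m; rfl
  | cons r rows' ih =>
    intro i h0 h5 m
    rw [List.foldl_cons, ih i h0 h5, pvGet6_pvUpd m i r h0 h5]

lemma pvGet6_foldSecs (secs : List (List String)) : ∀ (n : Nat)
    (m : List (PySem.Dict Int (Int × Int))), n + secs.length ≤ 6 →
    ((PySem.List.enumerate secs (n : Int)).foldl pvF m)[6]? = m[6]? := by
  induction secs with
  | nil => intro n m _; rw [PySem.List.enumerate_nil]; rfl
  | cons sec secs' ih =>
    intro n m h
    rw [PySem.List.enumerate_cons, List.foldl_cons]
    rw [show ((n : Int) + 1) = ((n + 1 : Nat) : Int) from by push_cast; ring]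
    rw [ih (n + 1) _ (by simp at h; omega)]
    exact pvGet6_foldRows _ _ (by positivity) (by simp at h; omega) m

lemma pvLen_pvSplit1 : ∀ (u cur : List String), (pvSplit u cur).1.length = u.count "" := by
  intro u
  induction u with
  | nil => intro cur; simp [pvSplit]
  | cons x rest ih =>
    intro cur
    by_cases hx : x = ""
    · subst hx
      rw [pvSplit, if_pos rfl]
      simp [ih, List.count_cons]
    · rw [pvSplit, if_neg hx, ih]
      simp [hx]

-- ===== VERDICT (by name: the statement is the Claim_ definition above) =====
theorem get_maps_spec : Claim_unchanged_get_maps := by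
  intro data _ hpre hnd
  obtain ⟨hcnt, hwf, hsep, hcons, himp⟩ := hpre
  have hd : (data.drop 1).headD "" = "" ∧ pvHasConsecBlank (data.drop 1) = false := by
    unfold D_get_maps at hnd
    push_neg at hnd
    exact ⟨hnd, hcons⟩
  show get_maps data = get_maps_alt data
  simp only [get_maps, get_maps_alt]
  rw [pvLoopA_eq_loopL data data.length 1 _ _ (by omega)]
  by_cases hlen : data.length < 2
  · have ht : data.drop 1 = [] := by
      have : (data.drop 1).length = 0 := by simp; omega
      exact List.eq_nil_of_length_eq_zero this
    rw [ht, if_pos hlen, pvLoopL_nil]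
    rfl
  · cases ht : data.drop 1 with
    | nil =>
      exfalso
      have : (data.drop 1).length = data.length - 1 := by simp
      rw [ht] at this
      simp at this
      omega
    | cons x rest =>
      have hx : x = "" := by
        have := hd.1
        rw [ht] at this
        simpa using this
      subst hx
      rw [if_neg hlen, PySem.List.index?_cons_self]
      dsimp only
      rw [show ("" :: rest).drop (0 + 1) = rest from rfl]
      rw [pvFoldl_split]
      rw [ht] at hwf hd
      have h0 : (-1 : Int) = ((0 : Nat) : Int) - 1 := by norm_num
      rw [h0, pvMain ("" :: rest).length ("" :: rest) le_rfl _ 0 hwf hd.2 (by simp)]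
      rw [show pvSplit ("" :: rest) []
            = (([] : List String) :: (pvSplit rest []).1, (pvSplit rest []).2) from
          by rw [pvSplit, if_pos rfl]]
      rw [show ((([] : List String) :: (pvSplit rest []).1) ++ [(pvSplit rest []).2]).drop 1
            = (pvSplit rest []).1 ++ [(pvSplit rest []).2] from by
          rw [List.cons_append, List.drop_one, List.tail_cons]]
      rfl

theorem get_maps_changed : Claim_changed_get_maps := by unfold Claim_changed_get_maps; decide

theorem get_maps_tight : Claim_exact_get_maps := by
  intro data _ hpre hD heq
  obtain ⟨hcnt, hwf, hsep, hcons, himp⟩ := hpre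
  unfold D_get_maps at hD
  cases ht : data.drop 1 with
  | nil => rw [ht] at hD; simp at hD
  | cons x rest =>
    rw [ht] at hD hwf hsep hcnt himp
    have hx : x ≠ "" := by simpa using hD
    have hcount6 : (x :: rest).count "" ≤ 6 := himp (by simpa using hD)
    have hcx : (x :: rest).count "" = rest.count "" := by
      simp [hx]
    have hlen2 : 2 ≤ data.length := by
      have hl : (data.drop 1).length = data.length - 1 := by simp
      rw [ht] at hl
      simp at hl
      omega
    have hmem : "" ∈ rest := by
      rcases hsep with h | h
      · omega
      · rcases List.mem_cons.mp h with h | h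
        · exact absurd h.symm hx
        · exact h
    cases hidx : PySem.List.index? rest "" with
    | none => exact absurd hmem ((PySem.List.index?_eq_none_iff rest "").mp hidx)
    | some k =>
      obtain ⟨pre, suf, hsplit, hklen, hnomem⟩ := (PySem.List.index?_eq_some_iff rest "" k).mp hidx
      have hcsuf : suf.count "" ≤ 5 := by
        have h1 : rest.count "" = pre.count "" + (1 + suf.count "") := by
          rw [hsplit, List.count_append]
          simp [List.count_cons]
          omega
        have h2 : pre.count "" = 0 := List.count_eq_zero.mpr hnomem
        omega
      -- A's sixth dictionary is nonempty
      have hwfx : ((pvParseRow x).isSome && pvWf rest) = true := by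
        rw [pvWf.eq_def] at hwf
        simpa [hx] using hwf
      obtain ⟨hpx, hwfrest⟩ := Bool.and_eq_true_iff.mp hwfx
      obtain ⟨⟨d, s, rr⟩, hv⟩ := Option.isSome_iff_exists.mp hpx
      have hA : ∃ dA, (pvLoopL (x :: rest)
          [PySem.Dict.empty, PySem.Dict.empty, PySem.Dict.empty, PySem.Dict.empty,
           PySem.Dict.empty, PySem.Dict.empty, PySem.Dict.empty] (-1))[6]? = some dA ∧
          dA.items ≠ [] := by
        rw [pvLoopL_row x hx, hv]
        dsimp only
        refine pvPreA rest.length rest le_rfl _ hwfrest (by omega)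
          (by rw [pvLen_pvSetMap]; rfl) ⟨PySem.Dict.empty.insert s (rr, d), ?_, ?_⟩
        · exact pvGet6_pvSetMap_neg_one _ (by rfl) s (rr, d) PySem.Dict.empty (by rfl)
        · exact pvItems_insert_ne_nil _ s (rr, d)
      obtain ⟨dA, hdA, hdAne⟩ := hA
      -- both sides, rewritten to their loop results
      have hbridge : get_maps data = (pvLoopL (x :: rest)
          [PySem.Dict.empty, PySem.Dict.empty, PySem.Dict.empty, PySem.Dict.empty,
           PySem.Dict.empty, PySem.Dict.empty, PySem.Dict.empty] (-1)).map PySem.Dict.items := by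
        simp only [get_maps]
        rw [pvLoopA_eq_loopL data data.length 1 _ _ (by omega), ht]
      have halt : get_maps_alt data = ((PySem.List.enumerate
            ((pvSplit suf []).1 ++ [(pvSplit suf []).2]) (0 : Int)).foldl pvF
          (List.replicate 7 PySem.Dict.empty)).map PySem.Dict.items := by
        simp only [get_maps_alt]
        rw [if_neg (by omega : ¬ data.length < 2)]
        rw [ht, PySem.List.index?_cons_of_ne rest hx, hidx]
        simp only [Option.map_some]
        rw [show (x :: rest).drop (k + 1 + 1) = rest.drop (k + 1) from rfl]
        rw [hsplit, ← hklen, List.drop_length_add_append,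
            show ("" :: suf).drop 1 = suf from rfl]
        rw [pvFoldl_split]
        rfl
      rw [hbridge, halt] at heq
      have h6 := congrArg (fun l => l[6]?) heq
      simp only [List.getElem?_map] at h6
      rw [hdA] at h6
      rw [show PySem.List.enumerate ((pvSplit suf []).1 ++ [(pvSplit suf []).2]) (0 : Int)
            = PySem.List.enumerate ((pvSplit suf []).1 ++ [(pvSplit suf []).2]) (((0 : Nat) : Int)) from rfl] at h6
      rw [pvGet6_foldSecs _ 0 _ (by
            simp [pvLen_pvSplit1]
            omega)] at h6
      rw [show (List.replicate 7 (PySem.Dict.empty : PySem.Dict Int (Int × Int)))[6]?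
            = some PySem.Dict.empty from rfl] at h6
      simp only [Option.map_some] at h6
      exact hdAne (by simpa using h6)
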